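-- pv_equiv track=rewrite | github.com/zengury/soul-forge | pipeline/04_synthesize.py | compute_time_span
-- ===== SOURCE A (Python) =====
-- def compute_time_span(obs_list: list[dict]) -> str:
--     ranges = [o.get("time_range", "") for o in obs_list if o.get("time_range")]
--     if not ranges:
--         return "未知时间范围"
--     all_times = []
--     for r in ranges:
--         parts = r.split("~")
--         all_times.extend(p.strip() for p in parts if p.strip())
--     all_times.sort()
--     if len(all_times) >= 2:
--         return f"{all_times[0][:7]} ～ {all_times[-1][:7]}"
--     return all_times[0][:7] if all_times else "未知"
-- ===== SOURCE B (Python) =====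
-- def compute_time_span(obs_list: list[dict]) -> str:
--     # One pass: running lexicographic min/max and a count, no intermediate list, no sort.
--     lo = hi = None
--     count = 0
--     has_range = False
--     for o in obs_list:
--         r = o.get("time_range", "")
--         if not r:
--             continue
--         has_range = True
--         for p in r.split("~"):
--             p = p.strip()
--             if not p:
--                 continue
--             count += 1
--             if lo is None or p < lo:
--                 lo = p
--             if hi is None or hi < p:
--                 hi = p
--     if not has_range:
--         return "未知时间范围"
--     if count >= 2:
--         return f"{lo[:7]} ～ {hi[:7]}"
--     return lo[:7] if count == 1 else "未知"
-- ===== Notes on version B (the rewrite author's own statement) =====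
-- stated objective: alternative
-- what changed: Replaces building the intermediate ranges/all_times lists and sorting them with a single pass that keeps a running lexicographic min, max, count and a has-range flag.
import Mathlib
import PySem

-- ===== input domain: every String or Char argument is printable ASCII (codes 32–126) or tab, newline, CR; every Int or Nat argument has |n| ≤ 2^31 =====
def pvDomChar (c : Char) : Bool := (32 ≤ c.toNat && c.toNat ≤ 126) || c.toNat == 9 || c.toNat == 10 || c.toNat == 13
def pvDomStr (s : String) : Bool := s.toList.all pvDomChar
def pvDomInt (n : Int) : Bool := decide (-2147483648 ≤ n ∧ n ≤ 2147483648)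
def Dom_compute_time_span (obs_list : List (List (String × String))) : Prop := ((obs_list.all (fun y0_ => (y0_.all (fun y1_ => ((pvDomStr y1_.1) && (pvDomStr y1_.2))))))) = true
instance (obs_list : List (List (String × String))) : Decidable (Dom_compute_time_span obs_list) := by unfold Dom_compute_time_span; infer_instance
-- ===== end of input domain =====

-- B replaces A's intermediate lists and sort by a single pass keeping a running min/max/count (objective: alternative; no intermediate lists, no sort).

-- ===== PORT A =====
-- 'parts = r.split("~"); extend(p.strip() for p in parts if p.strip())'
def pvSplitStripA (r : String) : List String :=
  (((PySem.Str.split? r "~").getD []).map PySem.Str.strip).filter (fun p => p ≠ "")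

def compute_time_span (obs_list : List (List (String × String))) : String :=
  let ranges := obs_list.foldl (fun acc o =>
      let v := PySem.Dict.getD (PySem.Dict.mk o) "time_range" ""
      if v = "" then acc else acc ++ [v]) []
  if ranges = [] then "未知时间范围"
  else
    let all_times := ranges.foldl (fun acc r => acc ++ pvSplitStripA r) []
    let ts := PySem.List.sorted all_times (fun x => x) false
    if 2 ≤ ts.length then
      PySem.Str.slice (ts.headD "") none (some 7) ++ " ～ " ++ PySem.Str.slice (ts.getLastD "") none (some 7)
    else if ts ≠ [] then PySem.Str.slice (ts.headD "") none (some 7)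
    else "未知"

-- ===== PORT B =====
-- one time value p: update running (lo, hi, count)
def pvUpd (st : Option String × Option String × Nat) (p : String) : Option String × Option String × Nat :=
  ((match st.1 with | none => some p | some l => if p < l then some p else some l),
   (match st.2.1 with | none => some p | some h => if h < p then some p else some h),
   st.2.2 + 1)

-- one observation o: fold its stripped non-empty parts into the running state
def pvStep (st : Option String × Option String × Nat × Bool) (o : List (String × String)) :
    Option String × Option String × Nat × Bool :=
  let r := PySem.Dict.getD (PySem.Dict.mk o) "time_range" ""
  if r = "" then st
  else
    let s3 := ((PySem.Str.split? r "~").getD []).foldl (fun s p0 =>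
        let p := PySem.Str.strip p0
        if p = "" then s else pvUpd s p) (st.1, st.2.1, st.2.2.1)
    (s3.1, s3.2.1, s3.2.2, true)

def compute_time_span_alt (obs_list : List (List (String × String))) : String :=
  let st := obs_list.foldl pvStep ((none, none, 0, false) : Option String × Option String × Nat × Bool)
  if st.2.2.2 = false then "未知时间范围"
  else if 2 ≤ st.2.2.1 then
    PySem.Str.slice (st.1.getD "") none (some 7) ++ " ～ " ++ PySem.Str.slice (st.2.1.getD "") none (some 7)
  else if st.2.2.1 = 1 then PySem.Str.slice (st.1.getD "") none (some 7)
  else "未知"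

-- ===== PRECONDITION & SPEC =====
def Spec_compute_time_span (obs_list : List (List (String × String))) (out : String) : Prop := out = compute_time_span_alt obs_list
instance (obs_list : List (List (String × String))) (out : String) : Decidable (Spec_compute_time_span obs_list out) := by unfold Spec_compute_time_span; infer_instance

-- ===== CLAIM (what is proved, stated in full; the proofs are below) =====
def Claim_equal_compute_time_span : Prop := ∀ (obs_list : List (List (String × String))), Dom_compute_time_span obs_list → Spec_compute_time_span obs_list (compute_time_span obs_list)

-- ===== LEMMAS AND PROOFS =====

-- running-min / running-max one-step updates
def pvMinO (lo : Option String) (p : String) : Option String :=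
  match lo with | none => some p | some l => if p < l then some p else some l
def pvMaxO (hi : Option String) (p : String) : Option String :=
  match hi with | none => some p | some h => if h < p then some p else some h


theorem pvMinO_some (l p : String) : pvMinO (some l) p = some (min l p) := by
  simp only [pvMinO, min_def]
  by_cases h : p < l
  · simp [h, not_le.mpr h]
  · simp [h, not_lt.mp h]

theorem pvMaxO_some (h p : String) : pvMaxO (some h) p = some (max h p) := by
  simp only [pvMaxO, max_def]
  rcases lt_trichotomy h p with hh | hh | hh
  · simp [hh, le_of_lt hh]
  · subst hh; simp
  · simp [not_lt.mpr (le_of_lt hh), not_le.mpr hh]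

theorem foldl_pvMinO_some (t : List String) (l : String) :
    t.foldl pvMinO (some l) = some (t.foldl min l) := by
  induction t generalizing l with
  | nil => rfl
  | cons x xs ih => simp [List.foldl_cons, pvMinO_some, ih]

theorem foldl_pvMaxO_some (t : List String) (h : String) :
    t.foldl pvMaxO (some h) = some (t.foldl max h) := by
  induction t generalizing h with
  | nil => rfl
  | cons x xs ih => simp [List.foldl_cons, pvMaxO_some, ih]

-- B's per-time fold splits into the three running quantities
theorem foldl_pvUpd (ts : List String) (lo hi : Option String) (c : Nat) :
    ts.foldl pvUpd (lo, hi, c) = (ts.foldl pvMinO lo, ts.foldl pvMaxO hi, c + ts.length) := by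
  induction ts generalizing lo hi c with
  | nil => rfl
  | cons x xs ih =>
      simp only [List.foldl_cons, List.length_cons, pvUpd, pvMinO, pvMaxO, ih]
      simp only [Prod.mk.injEq, true_and]
      omega

-- B's inner loop (strip + skip empties) is the pvUpd fold over A's filtered list
theorem inner_fold_eq (ps : List String) (st : Option String × Option String × Nat) :
    ps.foldl (fun s p0 => let p := PySem.Str.strip p0; if p = "" then s else pvUpd s p) st
      = (((ps.map PySem.Str.strip).filter (fun p => p ≠ "")).foldl pvUpd st) := by
  induction ps generalizing st with
  | nil => rfl
  | cons x xs ih =>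
      simp only [List.foldl_cons, List.map_cons, List.filter_cons]
      by_cases h : PySem.Str.strip x = ""
      · simp [h, ih]
      · simp [h, ih]

-- A's ranges loop, characterized recursively
def pvRangeVal (o : List (String × String)) : String :=
  PySem.Dict.getD (PySem.Dict.mk o) "time_range" ""

def pvRanges : List (List (String × String)) → List String
  | [] => []
  | o :: xs => (if pvRangeVal o = "" then [] else [pvRangeVal o]) ++ pvRanges xs

theorem ranges_foldl_eq (xs : List (List (String × String))) (acc : List String) :
    xs.foldl (fun acc o =>
      let v := PySem.Dict.getD (PySem.Dict.mk o) "time_range" ""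
      if v = "" then acc else acc ++ [v]) acc = acc ++ pvRanges xs := by
  induction xs generalizing acc with
  | nil => simp [pvRanges]
  | cons o xs ih =>
      simp only [List.foldl_cons, pvRanges, pvRangeVal]
      by_cases h : PySem.Dict.getD (PySem.Dict.mk o) "time_range" "" = ""
      · simp [h, ih]
      · simp [h, ih]

-- the multiset of all parsed times
def pvTimes (xs : List (List (String × String))) : List String :=
  (pvRanges xs).flatMap pvSplitStripA

theorem all_times_foldl_eq (rs : List String) (acc : List String) :
    rs.foldl (fun acc r => acc ++ pvSplitStripA r) acc = acc ++ rs.flatMap pvSplitStripA := by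
  induction rs generalizing acc with
  | nil => simp
  | cons r rs ih => simp [List.foldl_cons, ih]

-- B's outer fold computes (running min, running max, count, ranges-nonempty)
theorem pvStep_eq (st : Option String × Option String × Nat × Bool) (o : List (String × String)) :
    pvStep st o = if pvRangeVal o = "" then st else
      ((pvSplitStripA (pvRangeVal o)).foldl pvMinO st.1,
       (pvSplitStripA (pvRangeVal o)).foldl pvMaxO st.2.1,
       st.2.2.1 + (pvSplitStripA (pvRangeVal o)).length, true) := by
  by_cases h : pvRangeVal o = ""
  · simp [pvStep, pvRangeVal] at h ⊢
    simp [h]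
  · have h2 : ¬ PySem.Dict.getD (PySem.Dict.mk o) "time_range" "" = "" := h
    simp only [pvStep, if_neg h2, inner_fold_eq, foldl_pvUpd, pvSplitStripA, pvRangeVal]

theorem outer_fold_eq (xs : List (List (String × String)))
    (lo hi : Option String) (c : Nat) (hr : Bool) :
    xs.foldl pvStep (lo, hi, c, hr)
    = ((pvTimes xs).foldl pvMinO lo, (pvTimes xs).foldl pvMaxO hi,
       c + (pvTimes xs).length, hr || decide (pvRanges xs ≠ [])) := by
  induction xs generalizing lo hi c hr with
  | nil => simp [pvTimes, pvRanges]
  | cons o xs ih =>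
      simp only [List.foldl_cons, pvStep_eq]
      by_cases h : pvRangeVal o = ""
      · rw [if_pos h, ih]
        simp [pvTimes, pvRanges, h]
      · rw [if_neg h, ih]
        have hts : pvTimes (o :: xs) = pvSplitStripA (pvRangeVal o) ++ pvTimes xs := by
          simp [pvTimes, pvRanges, h]
        simp only [hts, List.foldl_append, List.length_append, Prod.mk.injEq, true_and]
        refine ⟨by omega, ?_⟩
        simp [pvRanges, h]

-- head of sorted list = running min
theorem sorted_headD_eq_min (x : String) (t : List String) :
    (PySem.List.sorted (x :: t) (fun y => y) false).headD "" = t.foldl min x := by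
  rcases hs : PySem.List.sorted (x :: t) (fun y => y) false with _ | ⟨m, rest⟩
  · exact absurd ((PySem.List.sorted_eq_nil_iff _ _ _).mp hs) (by simp)
  · have hmem : m ∈ x :: t := (PySem.List.mem_sorted _ _ _ m).mp (hs ▸ List.mem_cons_self)
    have hmin : PySem.List.min? (x :: t) (fun y => y) = some (t.foldl min x) :=
      PySem.List.min?_id_cons x t
    have h1 : ∀ y ∈ x :: t, m ≤ y := PySem.List.key_head_sorted_le (x :: t) (fun y => y) hs
    have h2 : ∀ y ∈ x :: t, t.foldl min x ≤ y := PySem.List.min?_isMin hmin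
    have h3 : t.foldl min x ∈ x :: t := PySem.List.min?_mem hmin
    simp only [List.headD_cons]
    exact le_antisymm (h1 _ h3) (h2 _ hmem)

-- last of sorted list = running max
theorem sorted_getLastD_eq_max (x : String) (t : List String) :
    (PySem.List.sorted (x :: t) (fun y => y) false).getLastD "" = t.foldl max x := by
  set s := PySem.List.sorted (x :: t) (fun y => y) false with hs
  have hne : s ≠ [] := by
    intro h; exact absurd ((PySem.List.sorted_eq_nil_iff _ _ _).mp (hs ▸ h)) (by simp)
  have hlen : 0 < s.length := List.length_pos_iff.mpr hne
  have hlast : s.getLastD "" = s[s.length - 1] := by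
    rw [List.getLastD_eq_getLast?, List.getLast?_eq_some_getLast hne, Option.getD_some,
      List.getLast_eq_getElem]
  have hmax : PySem.List.max? (x :: t) (fun y => y) = some (t.foldl max x) :=
    PySem.List.max?_id_cons x t
  have hub : ∀ y ∈ x :: t, y ≤ s[s.length - 1] := by
    intro y hy
    have hy' : y ∈ s := (PySem.List.mem_sorted _ _ _ y).mpr hy
    obtain ⟨p, hp, hyp⟩ := List.mem_iff_getElem.mp hy'
    have := PySem.List.sorted_id_getElem_mono (x :: t) (p := p) (q := s.length - 1)
      (by omega) (by rw [← hs]; omega)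
    rw [← hyp]
    exact this
  have hmem : s[s.length - 1] ∈ x :: t := by
    have : s[s.length - 1] ∈ s := List.getElem_mem _
    exact (PySem.List.mem_sorted _ _ _ _).mp this
  rw [hlast]
  exact le_antisymm (PySem.List.max?_isMax hmax _ hmem) (hub _ (PySem.List.max?_mem hmax))

-- ===== VERDICT (by name: the statement is the Claim_ definition above) =====
theorem compute_time_span_spec : Claim_equal_compute_time_span := by
  intro obs_list _
  unfold Spec_compute_time_span compute_time_span compute_time_span_alt
  simp only [ranges_foldl_eq, List.nil_append, outer_fold_eq, all_times_foldl_eq, Bool.false_or,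
    pvTimes]
  by_cases hR : pvRanges obs_list = []
  · simp [hR]
  · rw [if_neg hR]
    have hdec : decide (pvRanges obs_list ≠ []) = true := by simp [hR]
    simp only [hdec]
    rw [if_neg (by simp : ¬ (true = false))]
    rcases hts : (pvRanges obs_list).flatMap pvSplitStripA with _ | ⟨x, t⟩
    · have hsnil : PySem.List.sorted ([] : List String) (fun y => y) false = [] :=
        (PySem.List.sorted_eq_nil_iff _ _ _).mpr rfl
      simp [hsnil]
    · have hlen : (PySem.List.sorted (x :: t) (fun y => y) false).length = t.length + 1 := by
        simp [PySem.List.length_sorted]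
      have hfmin : (x :: t).foldl pvMinO none = some (t.foldl min x) := by
        simp [List.foldl_cons, pvMinO, foldl_pvMinO_some]
      have hfmax : (x :: t).foldl pvMaxO none = some (t.foldl max x) := by
        simp [List.foldl_cons, pvMaxO, foldl_pvMaxO_some]
      simp only [hlen, hfmin, hfmax, List.length_cons, Nat.zero_add]
      by_cases h2 : 2 ≤ t.length + 1
      · rw [if_pos h2, if_pos h2, sorted_headD_eq_min, sorted_getLastD_eq_max]
        simp
      · have ht0 : t = [] := by
          rcases t with _ | ⟨a, b⟩
          · rfl
          · simp at h2
        subst ht0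
        simp only [List.length_nil, Nat.zero_add] at h2 ⊢
        rw [if_neg h2, if_neg h2]
        have hne : PySem.List.sorted [x] (fun y : String => y) false ≠ [] := by
          intro h; exact absurd ((PySem.List.sorted_eq_nil_iff _ _ _).mp h) (by simp)
        rw [if_pos hne, sorted_headD_eq_min]
        simp
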